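-- pv_equiv track=rewrite | github.com/caiobinharj/SmartWatch-Research | first week/clustering.py | activity_colors
-- ===== SOURCE A (Python) =====
-- def activity_colors(acts: list[str]) -> list[str]:
-- 	groups = {
-- 		'red': set('ABC'),
-- 		'blue': set('DE'),
-- 		'#90EE90': set('FGPQR'),
-- 		'yellow': set('HIJKL'),
-- 		'#FF1493': set('MNO'),
-- 	}
-- 	def pick(a: str) -> str:
-- 		for c, s in groups.items():
-- 			if a in s:
-- 				return c
-- 		return 'gray'
-- 	return [pick(a) for a in acts]
-- ===== SOURCE B (Python) =====
-- def activity_colors(acts: list[str]) -> list[str]: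
-- 	groups = {
-- 		'red': 'ABC',
-- 		'blue': 'DE',
-- 		'#90EE90': 'FGPQR',
-- 		'yellow': 'HIJKL',
-- 		'#FF1493': 'MNO',
-- 	}
-- 	char_to_color = {}
-- 	for color, letters in groups.items():
-- 		for ch in letters:
-- 			char_to_color[ch] = color
-- 	return [char_to_color.get(a, 'gray') for a in acts]
-- ===== Notes on version B (the rewrite author's own statement) =====
-- stated objective: faster
-- what changed: B inverts the five color->letters groups once into a flat char_to_color dict and maps each activity through a single lookup with default 'gray', eliminating A's per-element scan over the five groups (and A's rebuilding of the five sets is done once, not per call pattern).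
import Mathlib
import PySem

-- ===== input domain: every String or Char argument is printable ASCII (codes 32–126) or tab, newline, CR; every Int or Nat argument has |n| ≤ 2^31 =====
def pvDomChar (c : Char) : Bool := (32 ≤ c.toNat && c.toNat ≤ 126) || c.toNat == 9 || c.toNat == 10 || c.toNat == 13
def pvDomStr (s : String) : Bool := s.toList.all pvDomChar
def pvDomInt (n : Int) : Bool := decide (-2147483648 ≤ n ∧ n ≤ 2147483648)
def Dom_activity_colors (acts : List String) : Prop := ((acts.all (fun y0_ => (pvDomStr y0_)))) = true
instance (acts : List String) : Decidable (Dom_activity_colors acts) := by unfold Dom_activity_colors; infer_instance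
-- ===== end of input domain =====

-- B builds the inverted char->color table once and maps each activity through one lookup ('gray' default), instead of A's per-element scan over the five groups (objective: simpler).

-- ===== PORT A =====
def pvGroupsA : PySem.Dict String (PySem.Set String) :=
  PySem.Dict.ofList
    [ ("red", PySem.Set.ofList ["A","B","C"])
    , ("blue", PySem.Set.ofList ["D","E"])
    , ("#90EE90", PySem.Set.ofList ["F","G","P","Q","R"])
    , ("yellow", PySem.Set.ofList ["H","I","J","K","L"])
    , ("#FF1493", PySem.Set.ofList ["M","N","O"]) ]

-- 'for c, s in groups.items(): if a in s: return c' then 'return "gray"'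
def pvPickLoop : List (String × PySem.Set String) → String → String
  | [], _ => "gray"
  | (c, s) :: rest, a => if PySem.Set.contains s a then c else pvPickLoop rest a

def pvPick (a : String) : String := pvPickLoop pvGroupsA.items a

def activity_colors (acts : List String) : List String := acts.map pvPick

-- ===== PORT B =====
def pvGroupsB : List (String × String) :=
  [ ("red", "ABC"), ("blue", "DE"), ("#90EE90", "FGPQR"),
    ("yellow", "HIJKL"), ("#FF1493", "MNO") ]

-- 'for color, letters in groups.items(): for ch in letters: char_to_color[ch] = color'
def pvTable : PySem.Dict String String :=
  pvGroupsB.foldl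
    (fun d p => p.2.toList.foldl (fun d ch => d.insert (String.ofList [ch]) p.1) d)
    PySem.Dict.empty

-- '[char_to_color.get(a, "gray") for a in acts]'
def activity_colors_alt (acts : List String) : List String :=
  acts.map (fun a => pvTable.getD a "gray")

-- ===== PRECONDITION & SPEC =====
def Spec_activity_colors (acts : List String) (out : List String) : Prop := out = activity_colors_alt acts
instance (acts : List String) (out : List String) : Decidable (Spec_activity_colors acts out) := by unfold Spec_activity_colors; infer_instance

-- ===== CLAIM (what is proved, stated in full; the proofs are below) =====
def Claim_equal_activity_colors : Prop := ∀ (acts : List String), Dom_activity_colors acts → Spec_activity_colors acts (activity_colors acts)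

-- ===== LEMMAS AND PROOFS =====
lemma pv_pointwise (a : String) : pvPick a = pvTable.getD a "gray" := by
  by_cases hA : a = "A"; · subst hA; decide
  by_cases hB : a = "B"; · subst hB; decide
  by_cases hC : a = "C"; · subst hC; decide
  by_cases hD : a = "D"; · subst hD; decide
  by_cases hE : a = "E"; · subst hE; decide
  by_cases hF : a = "F"; · subst hF; decide
  by_cases hG : a = "G"; · subst hG; decide
  by_cases hP : a = "P"; · subst hP; decide
  by_cases hQ : a = "Q"; · subst hQ; decide
  by_cases hR : a = "R"; · subst hR; decide
  by_cases hH : a = "H"; · subst hH; decide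
  by_cases hI : a = "I"; · subst hI; decide
  by_cases hJ : a = "J"; · subst hJ; decide
  by_cases hK : a = "K"; · subst hK; decide
  by_cases hL : a = "L"; · subst hL; decide
  by_cases hM : a = "M"; · subst hM; decide
  by_cases hN : a = "N"; · subst hN; decide
  by_cases hO : a = "O"; · subst hO; decide
  have hT : pvTable = PySem.Dict.mk
      [("A","red"),("B","red"),("C","red"),("D","blue"),("E","blue"),
       ("F","#90EE90"),("G","#90EE90"),("P","#90EE90"),("Q","#90EE90"),("R","#90EE90"),
       ("H","yellow"),("I","yellow"),("J","yellow"),("K","yellow"),("L","yellow"),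
       ("M","#FF1493"),("N","#FF1493"),("O","#FF1493")] := by decide
  have hGA : pvGroupsA.items = [ ("red", ["A","B","C"]), ("blue", ["D","E"]),
      ("#90EE90", ["F","G","P","Q","R"]), ("yellow", ["H","I","J","K","L"]),
      ("#FF1493", ["M","N","O"]) ] := by decide
  unfold pvPick
  rw [hT, hGA]
  simp [pvPickLoop, PySem.Dict.getD, PySem.Set.contains, PySem.Dict.get?,
        Ne.symm hA, Ne.symm hB, Ne.symm hC, Ne.symm hD, Ne.symm hE, Ne.symm hF,
        Ne.symm hG, Ne.symm hP, Ne.symm hQ, Ne.symm hR, Ne.symm hH, Ne.symm hI,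
        Ne.symm hJ, Ne.symm hK, Ne.symm hL, Ne.symm hM, Ne.symm hN, Ne.symm hO,
        hA, hB, hC, hD, hE, hF, hG, hP, hQ, hR, hH, hI, hJ, hK, hL, hM, hN, hO]

-- ===== VERDICT (by name: the statement is the Claim_ definition above) =====
theorem activity_colors_spec : Claim_equal_activity_colors := by
  intro acts _
  unfold Spec_activity_colors activity_colors activity_colors_alt
  exact List.map_congr_left fun a _ => pv_pointwise a
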